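-- pv_equiv track=rewrite | github.com/jerryli27/NewMaster | preprocessing_util.py | find_key_phrases_in_preprocessed_sentence
-- ===== SOURCE A (Python) =====
-- def find_key_phrases_in_preprocessed_sentence(sen, key_phrase_set):
--     # type: (str, Set[str]) -> List[int]
--     # Because the sentence should be pre_processed, words, phrases and punctuations are separated by space.
--     """
--
--     :param sen: A preprocessed sentence that possibly contains one or more key phrases.
--     :param key_phrase_set: A set of key phrases.
--     :return: The sorted indices of the key phrases in the sentence.
--     """
--     words = sen.split(' ')
--     ret = []
--     same_phrases = set()
--     for i, word in enumerate(words):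
--         if word in key_phrase_set and word not in same_phrases:
--             ret.append(i)
--             same_phrases.add(word)
--     return sorted(ret)
-- ===== SOURCE B (Python) =====
-- def find_key_phrases_in_preprocessed_sentence(sen, key_phrase_set):
--     # Inverted search: instead of scanning the sentence and filtering each word
--     # against the key set, search for each key phrase directly with list.index
--     # (its first occurrence), keeping only the keys that occur, then sort.
--     words = sen.split(' ')
--     return sorted(words.index(w) for w in key_phrase_set if w in words)
-- ===== Notes on version B (the rewrite author's own statement) =====
-- stated objective: alternative
-- what changed: B inverts the traversal: instead of A's single scan over the sentence words with an in-loop key-set membership test and a same_phrases set, B iterates over the key phrases and finds each one's first occurrence in the word list with list.index, then sorts the found positions.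
import Mathlib
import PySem

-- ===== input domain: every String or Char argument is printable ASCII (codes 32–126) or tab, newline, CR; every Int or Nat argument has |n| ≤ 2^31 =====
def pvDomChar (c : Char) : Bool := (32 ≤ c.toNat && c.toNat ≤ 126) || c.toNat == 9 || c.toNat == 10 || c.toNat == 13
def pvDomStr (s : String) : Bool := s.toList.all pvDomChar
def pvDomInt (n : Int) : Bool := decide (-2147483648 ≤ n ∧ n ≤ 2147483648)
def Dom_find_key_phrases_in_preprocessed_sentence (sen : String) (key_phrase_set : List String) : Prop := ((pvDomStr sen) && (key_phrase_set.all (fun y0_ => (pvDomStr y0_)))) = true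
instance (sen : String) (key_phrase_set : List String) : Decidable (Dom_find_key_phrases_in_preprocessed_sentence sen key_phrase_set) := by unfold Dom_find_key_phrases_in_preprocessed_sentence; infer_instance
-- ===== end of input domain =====

-- B inverts the traversal: it looks up each key phrase's first occurrence with list.index
-- instead of scanning the sentence with an in-loop key-set test; same return value (alternative).

-- ===== PORT A =====
-- the for loop of A: state = (i, same_phrases, ret)
def fkpLoopA (kset : List String) : List String → Int → PySem.Set String → List Int → List Int
  | [], _, _, ret => ret
  | w :: ws, i, seen, ret =>
    if w ∈ kset ∧ w ∉ seen then
      fkpLoopA kset ws (i + 1) (PySem.Set.add seen w) (ret ++ [i])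
    else
      fkpLoopA kset ws (i + 1) seen ret

def find_key_phrases_in_preprocessed_sentence (sen : String) (key_phrase_set : List String) : List Int :=
  PySem.List.sorted (fkpLoopA key_phrase_set ((PySem.Str.split? sen " ").getD []) 0 PySem.Set.empty []) (fun x => x) false

-- ===== PORT B =====
-- B's generator 'words.index(w) for w in key_phrase_set if w in words' is a filterMap:
-- PySem.List.index? words w is some (first-occurrence index) exactly when 'w in words'.
def find_key_phrases_in_preprocessed_sentence_alt (sen : String) (key_phrase_set : List String) : List Int :=
  PySem.List.sorted
    (key_phrase_set.filterMap (fun w =>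
      Option.map (fun n : Nat => (n : Int)) (PySem.List.index? ((PySem.Str.split? sen " ").getD []) w)))
    (fun x => x) false

-- ===== PRECONDITION & SPEC =====
-- Pre_ excludes key_phrase_set lists carrying a duplicate entry: the Python parameter is a set,
-- which cannot hold duplicates, so this excludes nothing a real caller can pass; on such a list
-- A's membership test counts a key once while B's per-key search lists its index once per copy.
def Pre_find_key_phrases_in_preprocessed_sentence (sen : String) (key_phrase_set : List String) : Prop :=
  key_phrase_set.Nodup
instance (sen : String) (key_phrase_set : List String) : Decidable (Pre_find_key_phrases_in_preprocessed_sentence sen key_phrase_set) := by unfold Pre_find_key_phrases_in_preprocessed_sentence; infer_instance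

def pvWitness_find_key_phrases_in_preprocessed_sentence : String × List String := ("the cat sat", ["cat", "dog"])

def Spec_find_key_phrases_in_preprocessed_sentence (sen : String) (key_phrase_set : List String) (out : List Int) : Prop := out = find_key_phrases_in_preprocessed_sentence_alt sen key_phrase_set
instance (sen : String) (key_phrase_set : List String) (out : List Int) : Decidable (Spec_find_key_phrases_in_preprocessed_sentence sen key_phrase_set out) := by unfold Spec_find_key_phrases_in_preprocessed_sentence; infer_instance

-- ===== CLAIM (what is proved, stated in full; the proofs are below) =====
def Claim_equal_find_key_phrases_in_preprocessed_sentence : Prop := ∀ (sen : String) (key_phrase_set : List String), Dom_find_key_phrases_in_preprocessed_sentence sen key_phrase_set → Pre_find_key_phrases_in_preprocessed_sentence sen key_phrase_set → Spec_find_key_phrases_in_preprocessed_sentence sen key_phrase_set (find_key_phrases_in_preprocessed_sentence sen key_phrase_set)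

-- ===== LEMMAS AND PROOFS =====

-- A's loop with the seen-set folded into the key list (keys erased as their words are consumed)
def fkpLoopE : List String → List String → Int → List Int
  | _, [], _ => []
  | ks, u :: ws, i =>
    if u ∈ ks then i :: fkpLoopE (ks.erase u) ws (i + 1) else fkpLoopE ks ws (i + 1)

lemma filter_and_ne_eq_erase_filter {α : Type} [DecidableEq α] (u : α) (q : α → Bool) :
    ∀ (l : List α), l.Nodup →
      l.filter (fun w => q w && !(w == u)) = (l.filter q).erase u := by
  intro l
  induction l with
  | nil => intro _; simp
  | cons a t ih =>
    intro hnd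
    have hndt := hnd.of_cons
    have hu' := (List.nodup_cons.mp hnd).1
    rcases eq_or_ne a u with rfl | hne
    · by_cases hp : q a = true
      · simp only [List.filter_cons, hp, BEq.rfl, Bool.not_true, Bool.and_false,
          if_true, List.erase_cons_head]
        refine List.filter_congr ?_
        intro w hw
        have : (w == a) = false := by
          simp only [beq_eq_false_iff_ne]; exact fun h => hu' (h ▸ hw)
        simp [this]
      · have hmem : a ∉ t.filter q := fun h => hu' (List.mem_of_mem_filter h)
        rw [List.filter_cons_of_neg (by simp [hp]), List.filter_cons_of_neg (by simp [hp]),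
            List.erase_of_not_mem hmem]
        refine List.filter_congr ?_
        intro w hw
        have : (w == a) = false := by
          simp only [beq_eq_false_iff_ne]; exact fun h => hu' (h ▸ hw)
        simp [this]
    · by_cases hp : q a = true
      · simp only [List.filter_cons, hp, if_true,
          (by simpa using hne : (a == u) = false), Bool.not_false, Bool.and_true]
        rw [List.erase_cons_tail (by simpa using hne), ih hndt]
      · simp [hp, ih hndt]

lemma filterMap_perm_cons_erase {α β : Type} [DecidableEq α] (f : α → Option β) (u : α) (b : β)
    (hf : f u = some b) :
    ∀ (ks : List α), u ∈ ks → List.Perm (ks.filterMap f) (b :: (ks.erase u).filterMap f) := by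
  intro ks
  induction ks with
  | nil => intro h; cases h
  | cons a t ih =>
    intro hmem
    rcases eq_or_ne a u with rfl | hne
    · simp [List.filterMap_cons, hf]
    · have hut : u ∈ t := by
        rcases List.mem_cons.mp hmem with h | h
        · exact absurd h.symm hne
        · exact h
      rw [List.erase_cons_tail (by simpa using hne)]
      rcases hfa : f a with _ | c
      · simpa [List.filterMap_cons, hfa] using ih hut
      · simp only [List.filterMap_cons, hfa]
        exact ((ih hut).cons c).trans (List.Perm.swap b c _)

-- A's seen-set bookkeeping is exactly the erasing loop over the not-yet-seen keys
lemma fkpLoopA_eq_loopE (kset : List String) (hnd : kset.Nodup) :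
    ∀ (ws : List String) (i : Int) (seen : PySem.Set String) (ret : List Int),
      fkpLoopA kset ws i seen ret = ret ++ fkpLoopE (kset.filter (fun w => decide (w ∉ seen))) ws i := by
  intro ws
  induction ws with
  | nil => intro i seen ret; simp [fkpLoopA, fkpLoopE]
  | cons u ws ih =>
    intro i seen ret
    by_cases h : u ∈ kset ∧ u ∉ seen
    · have hmem : u ∈ kset.filter (fun w => decide (w ∉ seen)) := by
        simp only [List.mem_filter, decide_eq_true_eq]
        exact ⟨h.1, h.2⟩
      simp only [fkpLoopA, if_pos h, fkpLoopE, if_pos hmem]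
      rw [ih (i + 1) (PySem.Set.add seen u) (ret ++ [i])]
      have heq : kset.filter (fun w => decide (w ∉ PySem.Set.add seen u))
          = (kset.filter (fun w => decide (w ∉ seen))).erase u := by
        rw [← filter_and_ne_eq_erase_filter u (fun w => decide (w ∉ seen)) kset hnd]
        refine List.filter_congr ?_
        intro w _
        by_cases hw : w ∈ PySem.Set.add seen u
        · rcases (PySem.Set.mem_add seen u w).mp hw with h1 | h1 <;> simp [hw, h1]
        · have h1 : w ∉ seen := fun hs => hw ((PySem.Set.mem_add seen u w).mpr (Or.inl hs))
          have h2 : w ≠ u := fun he => hw ((PySem.Set.mem_add seen u w).mpr (Or.inr he))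
          simp [hw, h1, h2]
      rw [heq]
      simp
    · have hmem : u ∉ kset.filter (fun w => decide (w ∉ seen)) := by
        simp only [List.mem_filter, decide_eq_true_eq]
        tauto
      simp only [fkpLoopA, if_neg h, fkpLoopE, if_neg hmem]
      exact ih (i + 1) seen ret

-- the erasing loop lists, in some order, the first-occurrence index of each key present
lemma fkpLoopE_perm :
    ∀ (ws : List String) (ks : List String) (i : Int), ks.Nodup →
      List.Perm (fkpLoopE ks ws i)
        (ks.filterMap (fun w => Option.map (fun n : Nat => (n : Int) + i) (PySem.List.index? ws w))) := by
  intro ws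
  induction ws with
  | nil =>
    intro ks i _
    simp [fkpLoopE, PySem.List.index?]
  | cons u ws ih =>
    intro ks i hnd
    have hcongr : ∀ w, w ≠ u →
        Option.map (fun n : Nat => (n : Int) + i) (PySem.List.index? (u :: ws) w)
          = Option.map (fun n : Nat => (n : Int) + (i + 1)) (PySem.List.index? ws w) := by
      intro w hw
      rw [PySem.List.index?_cons_of_ne (x := u) (v := w) (xs := ws) (Ne.symm hw)]
      cases PySem.List.index? ws w with
      | none => rfl
      | some n => simp [Option.map]; push_cast; ring
    by_cases hu : u ∈ ks
    · simp only [fkpLoopE, if_pos hu]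
      have hfu : Option.map (fun n : Nat => (n : Int) + i) (PySem.List.index? (u :: ws) u) = some i := by
        rw [PySem.List.index?_cons_self]; simp
      refine ((ih (ks.erase u) (i + 1) (hnd.erase u)).cons i).trans ?_
      have h1 : (ks.erase u).filterMap (fun w => Option.map (fun n : Nat => (n : Int) + (i + 1)) (PySem.List.index? ws w))
          = (ks.erase u).filterMap (fun w => Option.map (fun n : Nat => (n : Int) + i) (PySem.List.index? (u :: ws) w)) := by
        refine List.filterMap_congr ?_
        intro w hw
        have hwne : w ≠ u := ((List.Nodup.mem_erase_iff hnd).mp hw).1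
        exact (hcongr w hwne).symm
      rw [h1]
      exact (filterMap_perm_cons_erase _ u i hfu ks hu).symm
    · simp only [fkpLoopE, if_neg hu]
      refine (ih ks (i + 1) hnd).trans (List.Perm.of_eq ?_)
      refine ((List.filterMap_congr ?_)).symm
      intro w hw
      have hwne : w ≠ u := fun h => hu (h ▸ hw)
      exact hcongr w hwne

-- ===== VERDICT (by name: the statement is the Claim_ definition above) =====
theorem find_key_phrases_in_preprocessed_sentence_spec : Claim_equal_find_key_phrases_in_preprocessed_sentence := by
  intro sen kset _ hnd
  show _ = _
  unfold find_key_phrases_in_preprocessed_sentence find_key_phrases_in_preprocessed_sentence_alt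
  rw [PySem.List.sorted_id_eq_sorted_id_iff_perm]
  rw [fkpLoopA_eq_loopE kset hnd _ 0 PySem.Set.empty []]
  have h0 : kset.filter (fun w => decide (w ∉ (PySem.Set.empty : PySem.Set String))) = kset := by
    refine List.filter_eq_self.mpr ?_
    intro w _
    simp [PySem.Set.empty]
  rw [List.nil_append, h0]
  refine (fkpLoopE_perm _ kset 0 hnd).trans (List.Perm.of_eq ?_)
  refine List.filterMap_congr ?_
  intro w _
  cases PySem.List.index? ((PySem.Str.split? sen " ").getD []) w with
  | none => rfl
  | some n => simp
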